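-- pv_equiv track=rewrite | github.com/Tanya3108/kmap | K-Map.py | matchingChars
-- ===== SOURCE A (Python) =====
-- def matchingChars(x,y):
--         x=str(x)
--         y=str(y)
--         n=len(x)
--         c=0
--         for i in range(n):
--                 if x[i]==y[i]:
--                         c+=1
--         if c!=n-1:
--                 return 'False'                  #returns false when two characters have 2 or more non-matched characters
--         else:
--                 a=0
--                 for i in x:
--                         if i==y[a]:
--                                 a+=1
--                         else:
--                                 if a==n-1:
--                                         ans=x[0:a]+"-"
--                                 else:
--                                         ans=x[0:a]+"-"+x[a+1:]
--                                         return ans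
--         return ans
-- ===== SOURCE B (Python) =====
-- def matchingChars(x, y):
--     x = str(x)
--     y = str(y)
--     p = 0
--     for a, b in zip(x, y):
--         if a != b:
--             break
--         p += 1
--     if p == len(x):
--         return 'False'
--     if x[p+1:] != y[p+1:len(x)]:
--         return 'False'
--     return x[:p] + '-' + x[p+1:]
-- ===== Notes on version B (the rewrite author's own statement) =====
-- stated objective: alternative
-- what changed: Instead of counting matching positions and then re-scanning to relocate the mismatch, B finds the longest common prefix with an early-exit zip loop and decides by a single slice-equality test of the remaining tails (C-level slicing/comparison instead of two per-character Python loops), splicing the dash at the prefix boundary.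
import Mathlib
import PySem

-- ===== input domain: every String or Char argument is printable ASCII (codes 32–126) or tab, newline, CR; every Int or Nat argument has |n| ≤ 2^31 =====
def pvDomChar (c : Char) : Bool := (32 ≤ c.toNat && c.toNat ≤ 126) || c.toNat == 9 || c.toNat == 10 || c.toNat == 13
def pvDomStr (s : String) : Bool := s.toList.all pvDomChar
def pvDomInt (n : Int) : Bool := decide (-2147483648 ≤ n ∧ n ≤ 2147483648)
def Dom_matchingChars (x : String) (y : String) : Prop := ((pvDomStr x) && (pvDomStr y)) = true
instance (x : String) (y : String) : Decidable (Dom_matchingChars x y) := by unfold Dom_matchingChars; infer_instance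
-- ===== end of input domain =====

-- B replaces A's count-matches-then-relocate two-loop structure by a longest-common-prefix
-- scan with early exit followed by one tail slice-equality test (objective: alternative).

-- ===== PORT A =====
-- first loop of A: c = number of positions i in range(n) with x[i] == y[i]
def countA (xs ys : List Char) : Nat :=
  (List.range xs.length).foldl (fun c i => if xs.getD i ' ' == ys.getD i ' ' then c + 1 else c) 0

-- second loop of A: walks the chars of x, a = matches so far, ans = the pending answer;
-- Python's unbound `ans` (unreachable under Pre_) is rendered as `Option.getD ""`
def loopA (orig ys : List Char) : List Char → Nat → Option String → String
  | [], _, ans => ans.getD ""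
  | i :: rest, a, ans =>
      if i == ys.getD a ' ' then loopA orig ys rest (a + 1) ans
      else if a + 1 == orig.length then
        loopA orig ys rest a (some (String.ofList (orig.take a) ++ "-"))
      else String.ofList (orig.take a) ++ "-" ++ String.ofList (orig.drop (a + 1))

def matchingChars (x : String) (y : String) : String :=
  if (countA x.toList y.toList : Int) ≠ (x.toList.length : Int) - 1 then "False"
  else loopA x.toList y.toList x.toList 0 none

-- ===== PORT B =====
-- B's zip loop with break: length of the longest common prefix
def lcpB : List Char → List Char → Nat
  | a :: as, b :: bs => if a == b then lcpB as bs + 1 else 0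
  | _, _ => 0

-- body of B after p is known: the `p == len(x)` check, the tail slice-equality test, the splice
def altCore (xs ys : List Char) (p : Nat) : String :=
  if p == xs.length then "False"
  else if !(xs.drop (p + 1) == (ys.take xs.length).drop (p + 1)) then "False"
  else String.ofList (xs.take p) ++ "-" ++ String.ofList (xs.drop (p + 1))

def matchingChars_alt (x : String) (y : String) : String :=
  altCore x.toList y.toList (lcpB x.toList y.toList)

-- ===== PRECONDITION & SPEC =====
-- Pre_ excludes inputs with len(x) > len(y): there A's y[i] raises IndexError.
def Pre_matchingChars (x : String) (y : String) : Prop := x.toList.length ≤ y.toList.length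
instance (x : String) (y : String) : Decidable (Pre_matchingChars x y) := by
  unfold Pre_matchingChars; infer_instance
def pvWitness_matchingChars : String × String := ("abc", "adc")

def Spec_matchingChars (x : String) (y : String) (out : String) : Prop := out = matchingChars_alt x y
instance (x : String) (y : String) (out : String) : Decidable (Spec_matchingChars x y out) := by
  unfold Spec_matchingChars; infer_instance

-- ===== CLAIM (what is proved, stated in full; the proofs are below) =====
def Claim_equal_matchingChars : Prop := ∀ (x : String) (y : String), Dom_matchingChars x y → Pre_matchingChars x y → Spec_matchingChars x y (matchingChars x y)

-- ===== LEMMAS AND PROOFS =====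

-- proof-side helper: the list of mismatching indices (ties countA to lcpB)
def mismB (xs ys : List Char) : List Nat :=
  (List.range xs.length).filter (fun i => !(xs.getD i ' ' == ys.getD i ' '))

lemma foldl_count (q : Nat → Bool) (l : List Nat) (a : Nat) :
    l.foldl (fun c i => if q i then c + 1 else c) a = a + (l.filter q).length := by
  induction l generalizing a with
  | nil => simp
  | cons h t ih =>
    by_cases hq : q h <;> simp [List.foldl, List.filter, hq, ih] <;> omega

lemma countA_add (xs ys : List Char) : countA xs ys + (mismB xs ys).length = xs.length := by
  have := foldl_count (fun i => xs.getD i ' ' == ys.getD i ' ') (List.range xs.length) 0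
  unfold countA mismB
  rw [this]
  have : ∀ l : List Nat,
      ((l.filter (fun i => xs.getD i ' ' == ys.getD i ' ')).length
        + (l.filter (fun i => !(xs.getD i ' ' == ys.getD i ' '))).length = l.length) := by
    intro l
    induction l with
    | nil => simp
    | cons h t ih =>
      rw [List.filter_cons, List.filter_cons]
      cases hq : (xs.getD h ' ' == ys.getD h ' ') with
      | true =>
        simp only [Bool.not_true, reduceIte, Bool.false_eq_true, if_false, List.length_cons]; omega
      | false =>
        simp only [Bool.not_false, reduceIte, Bool.false_eq_true, if_false, List.length_cons]; omega
  have h2 := this (List.range xs.length)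
  simpa using h2

lemma mem_mismB (xs ys : List Char) (i : Nat) :
    i ∈ mismB xs ys ↔ i < xs.length ∧ (xs.getD i ' ' == ys.getD i ' ') = false := by
  simp [mismB, List.mem_filter, List.mem_range]

lemma lcpB_le (xs ys : List Char) : lcpB xs ys ≤ xs.length := by
  induction xs generalizing ys with
  | nil => simp [lcpB]
  | cons a as ih =>
    cases ys with
    | nil => simp [lcpB]
    | cons b bs =>
      by_cases h : a == b
      · simp only [lcpB, h, if_true, List.length_cons]
        exact Nat.succ_le_succ (ih bs)
      · simp [lcpB, h]

lemma lcpB_match (xs ys : List Char) (i : Nat) (hi : i < lcpB xs ys) :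
    (xs.getD i ' ' == ys.getD i ' ') = true := by
  induction xs generalizing ys i with
  | nil => simp [lcpB] at hi
  | cons a as ih =>
    cases ys with
    | nil => simp [lcpB] at hi
    | cons b bs =>
      by_cases h : a == b
      · simp only [lcpB, h, if_true] at hi
        cases i with
        | zero => simpa using h
        | succ j => simpa using ih bs j (by omega)
      · simp [lcpB, h] at hi

lemma lcpB_stop (xs ys : List Char) (hlen : xs.length ≤ ys.length)
    (h : lcpB xs ys < xs.length) :
    (xs.getD (lcpB xs ys) ' ' == ys.getD (lcpB xs ys) ' ') = false := by
  induction xs generalizing ys with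
  | nil => simp at h
  | cons a as ih =>
    cases ys with
    | nil => simp at hlen
    | cons b bs =>
      by_cases hab : a == b
      · simp only [lcpB, hab, if_true, List.length_cons] at h ⊢
        simpa using ih bs (by simpa using hlen) (by omega)
      · simpa [lcpB, hab] using hab

lemma tails_eq_iff (xs ys : List Char) (p : Nat) (hlen : xs.length ≤ ys.length) :
    (xs.drop (p + 1) = (ys.take xs.length).drop (p + 1)) ↔
      (∀ i, p + 1 ≤ i → i < xs.length → xs.getD i ' ' = ys.getD i ' ') := by
  constructor
  · intro h i h1 h2
    have hiy : i < ys.length := lt_of_lt_of_le h2 hlen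
    have hj : i - (p + 1) < (xs.drop (p + 1)).length := by
      simp [List.length_drop]; omega
    have e1 : (xs.drop (p + 1))[i - (p + 1)] = xs[i]'h2 := by
      rw [List.getElem_drop]
      congr 1; omega
    have hj2 : i - (p + 1) < ((ys.take xs.length).drop (p + 1)).length := by
      rw [← h]; exact hj
    have e2 : ((ys.take xs.length).drop (p + 1))[i - (p + 1)] = ys[i]'hiy := by
      rw [List.getElem_drop, List.getElem_take]
      congr 1; omega
    rw [List.getD_eq_getElem xs ' ' h2, List.getD_eq_getElem ys ' ' hiy, ← e1, ← e2]
    simp [h]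
  · intro h
    apply List.ext_getElem
    · simp [List.length_drop, List.length_take]; omega
    · intro j hj1 hj2
      have hlt : p + 1 + j < xs.length := by
        simp [List.length_drop] at hj1; omega
      have hlty : p + 1 + j < ys.length := lt_of_lt_of_le hlt hlen
      rw [List.getElem_drop, List.getElem_drop, List.getElem_take]
      have := h (p + 1 + j) (by omega) hlt
      rw [List.getD_eq_getElem xs ' ' hlt, List.getD_eq_getElem ys ' ' hlty] at this
      exact this

lemma range_filter_singleton (n p : Nat) (hp : p < n) :
    (List.range n).filter (fun i => i == p) = [p] := by
  induction n with
  | zero => omega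
  | succ m ih =>
    rw [List.range_succ, List.filter_append]
    by_cases hpm : p = m
    · subst hpm
      have h1 : (List.range p).filter (fun i => i == p) = [] := by
        apply List.filter_eq_nil_iff.mpr
        intro i hi
        simp [List.mem_range] at hi
        simp; omega
      simp [h1]
    · have hplt : p < m := by omega
      rw [ih hplt]
      have : ((m == p) : Bool) = false := by simp; omega
      simp [List.filter_cons, this]

lemma two_le_length {l : List Nat} {p q : Nat} (hp : p ∈ l) (hq : q ∈ l) (hne : p ≠ q) :
    2 ≤ l.length := by
  cases l with
  | nil => simp at hp
  | cons a t =>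
    by_cases hpa : p = a
    · have : q ∈ t := by
        rcases List.mem_cons.mp hq with h | h
        · exact absurd (hpa.trans h.symm) hne
        · exact h
      have := List.length_pos_of_mem this
      simp; omega
    · have : p ∈ t := by
        rcases List.mem_cons.mp hp with h | h
        · exact absurd h hpa
        · exact h
      have := List.length_pos_of_mem this
      simp; omega

lemma loopA_run (xs ys : List Char) (p : Nat) (hp : p < xs.length)
    (hm : ∀ i, i < xs.length → ((xs.getD i ' ' == ys.getD i ' ') = false ↔ i = p)) :
    ∀ k, k ≤ p → loopA xs ys (xs.drop k) k none =
      String.ofList (xs.take p) ++ "-" ++ String.ofList (xs.drop (p + 1)) := by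
  intro k hk
  induction hd : p - k generalizing k with
  | zero =>
    have hkp : k = p := by omega
    subst hkp
    rw [List.drop_eq_getElem_cons hp]
    have hget : xs.getD k ' ' = xs[k] := List.getD_eq_getElem xs ' ' hp
    have hne : (xs[k] == ys.getD k ' ') = false := by
      rw [← hget]; exact (hm k hp).mpr rfl
    rw [loopA, hne]
    simp only [Bool.false_eq_true, if_false]
    by_cases hlast : k + 1 = xs.length
    · simp only [hlast, beq_self_eq_true, if_true, List.drop_length]
      simp [loopA]
    · have : (k + 1 == xs.length) = false := by simpa using hlast
      rw [this]
      simp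
  | succ d ih =>
    have hklt : k < p := by omega
    have hkn : k < xs.length := lt_trans hklt hp
    rw [List.drop_eq_getElem_cons hkn]
    have hget : xs.getD k ' ' = xs[k] := List.getD_eq_getElem xs ' ' hkn
    have heq : (xs[k] == ys.getD k ' ') = true := by
      rw [← hget]
      by_contra h
      have := (hm k hkn).mp (by simpa using h)
      omega
    rw [loopA, heq]
    simp only [if_true]
    exact ih (k + 1) (by omega) (by omega)

-- ===== VERDICT (by name: the statement is the Claim_ definition above) =====
theorem matchingChars_spec : Claim_equal_matchingChars := by
  intro x y _hd hpre
  unfold Spec_matchingChars matchingChars matchingChars_alt altCore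
  have hlen : x.toList.length ≤ y.toList.length := hpre
  have hcnt := countA_add x.toList y.toList
  have hple := lcpB_le x.toList y.toList
  by_cases hpn : lcpB x.toList y.toList = x.toList.length
  · -- no mismatch at all: both sides return "False"
    have hm0 : mismB x.toList y.toList = [] := by
      apply List.filter_eq_nil_iff.mpr
      intro i hi
      simp only [List.mem_range] at hi
      have h := lcpB_match x.toList y.toList i (by omega)
      simp only [beq_iff_eq] at h
      simpa [List.getD] using h
    rw [hm0] at hcnt
    simp only [List.length_nil, Nat.add_zero] at hcnt
    rw [if_pos (by omega), if_pos (by simpa using hpn)]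
  · have hplt : lcpB x.toList y.toList < x.toList.length := by omega
    have hstop := lcpB_stop x.toList y.toList hlen hplt
    by_cases htail : x.toList.drop (lcpB x.toList y.toList + 1)
        = (y.toList.take x.toList.length).drop (lcpB x.toList y.toList + 1)
    · -- exactly one mismatch, at p = lcpB
      have htl := (tails_eq_iff x.toList y.toList (lcpB x.toList y.toList) hlen).mp htail
      have hm : ∀ i, i < x.toList.length →
          ((x.toList.getD i ' ' == y.toList.getD i ' ') = false ↔ i = lcpB x.toList y.toList) := by
        intro i hi
        constructor
        · intro hne
          by_contra hip
          rcases Nat.lt_or_ge i (lcpB x.toList y.toList) with h | h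
          · rw [lcpB_match x.toList y.toList i h] at hne; simp at hne
          · have : lcpB x.toList y.toList + 1 ≤ i := by omega
            rw [htl i this hi] at hne; simp at hne
        · intro h; subst h; exact hstop
      have hm1 : mismB x.toList y.toList = [lcpB x.toList y.toList] := by
        unfold mismB
        rw [List.filter_congr (fun i hi => ?_), range_filter_singleton _ _ hplt]
        simp only [List.mem_range] at hi
        cases hb : (x.toList.getD i ' ' == y.toList.getD i ' ') with
        | false => simp [(hm i hi).mp hb]
        | true =>
          have : ¬ (i = lcpB x.toList y.toList) := fun h => by
            rw [(hm i hi).mpr h] at hb; cases hb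
          simp [this]
      rw [hm1] at hcnt
      simp only [List.length_singleton] at hcnt
      rw [if_neg (by omega)]
      rw [if_neg (by simpa using hpn)]
      rw [htail]
      simp only [beq_self_eq_true, Bool.not_true, Bool.false_eq_true, if_false]
      rw [← htail]
      have := loopA_run x.toList y.toList (lcpB x.toList y.toList) hplt hm 0 (Nat.zero_le _)
      simpa using this
    · -- at least two mismatches: both sides return "False"
      have htl := (tails_eq_iff x.toList y.toList (lcpB x.toList y.toList) hlen)
      have : ¬ ∀ i, lcpB x.toList y.toList + 1 ≤ i → i < x.toList.length →
          x.toList.getD i ' ' = y.toList.getD i ' ' := fun h => htail (htl.mpr h)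
      push_neg at this
      obtain ⟨q, hq1, hq2, hq3⟩ := this
      have hqm : q ∈ mismB x.toList y.toList :=
        (mem_mismB _ _ q).mpr ⟨hq2, by simpa using hq3⟩
      have hpm : lcpB x.toList y.toList ∈ mismB x.toList y.toList :=
        (mem_mismB _ _ _).mpr ⟨hplt, hstop⟩
      have h2 : 2 ≤ (mismB x.toList y.toList).length :=
        two_le_length hpm hqm (by omega)
      rw [if_pos (by omega)]
      rw [if_neg (by simpa using hpn)]
      have : (x.toList.drop (lcpB x.toList y.toList + 1)
          == (y.toList.take x.toList.length).drop (lcpB x.toList y.toList + 1)) = false := by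
        simpa using htail
      rw [this]
      simp
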